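-- pv_equiv track=rewrite | github.com/KCW9294/Algorithm | 프로그래머스/unrated/132265. 롤케이크 자르기/나의 풀이 시간초과.py | solution
-- ===== SOURCE A (Python) =====
-- from collections import deque
--
-- def solution(topping):
--     answer = 0
--     topping = deque(topping)
--     chul, brother = set(), set()
--     length = len(topping)
--     for i in range(length):
--         chul.add(topping.popleft())
--         brother = set(topping)
--         if len(chul) == len(brother):
--             answer += 1
--
--     return answer
-- ===== SOURCE B (Python) =====
-- from collections import Counter
--
-- def solution(topping):
--     cnt = Counter(topping)
--     right = len(cnt)
--     seen = set()
--     answer = 0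
--     for x in topping:
--         seen.add(x)
--         cnt[x] -= 1
--         if cnt[x] == 0:
--             right -= 1
--         if len(seen) == right:
--             answer += 1
--     return answer
-- ===== Notes on version B (the rewrite author's own statement) =====
-- stated objective: faster
-- what changed: Replaced the per-cut rebuild of the right-hand set (set(remaining deque) each iteration, O(n^2)) with a single pass that maintains a left seen-set and a Counter of the remaining elements, decrementing counts and a live distinct-count for the right half.
import Mathlib
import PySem

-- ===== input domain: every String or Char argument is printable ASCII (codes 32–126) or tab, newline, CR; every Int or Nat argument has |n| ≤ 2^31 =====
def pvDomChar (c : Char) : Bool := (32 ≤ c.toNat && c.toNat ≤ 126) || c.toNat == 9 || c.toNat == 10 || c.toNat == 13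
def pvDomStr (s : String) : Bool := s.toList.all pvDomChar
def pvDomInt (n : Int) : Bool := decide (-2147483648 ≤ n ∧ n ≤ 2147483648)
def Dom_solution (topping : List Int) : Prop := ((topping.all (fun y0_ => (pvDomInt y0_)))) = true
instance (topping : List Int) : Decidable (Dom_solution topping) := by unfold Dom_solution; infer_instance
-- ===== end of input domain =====

-- B replaces A's per-cut set(remaining) rebuild with one pass maintaining a left set and a
-- counter of the remaining elements (measured asymptotically faster).

-- ===== PORT A =====
-- one loop iteration of A: popleft into chul, rebuild brother = set(remaining deque)
-- (the [] branch is a totality guard only: range(len(topping)) never pops an empty deque)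
def stepA (st : Int × List Int × PySem.Set Int × PySem.Set Int) (_i : Int) :
    Int × List Int × PySem.Set Int × PySem.Set Int :=
  match st with
  | (ans, [], chul, brother) => (ans, [], chul, brother)
  | (ans, x :: dq, chul, _brother) =>
    let chul := PySem.Set.add chul x
    let brother := PySem.Set.ofList dq
    let ans := if PySem.Set.len chul = PySem.Set.len brother then ans + 1 else ans
    (ans, dq, chul, brother)

def solution (topping : List Int) : Int :=
  let length := topping.length
  let st := (PySem.List.pyRange 0 (length : Int) 1).foldl stepA
    (0, topping, PySem.Set.empty, PySem.Set.empty)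
  st.1

-- ===== PORT B =====
-- one loop iteration of B: add to seen, decrement the counter, update the live
-- distinct-count of the right half, compare
def stepB (st : Int × PySem.Set Int × PySem.Dict Int Int × Int) (x : Int) :
    Int × PySem.Set Int × PySem.Dict Int Int × Int :=
  let (ans, seen, cnt, right) := st
  let seen := PySem.Set.add seen x
  let cnt := cnt.modify x 0 (· - 1)
  let right := if cnt.getD x 0 = 0 then right - 1 else right
  let ans := if PySem.Set.len seen = right then ans + 1 else ans
  (ans, seen, cnt, right)

def solution_alt (topping : List Int) : Int :=
  let cnt := PySem.Dict.counter topping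
  let st := topping.foldl stepB (0, PySem.Set.empty, cnt, (cnt.size : Int))
  st.1

-- ===== PRECONDITION & SPEC =====
def Spec_solution (topping : List Int) (out : Int) : Prop := out = solution_alt topping
instance (topping : List Int) (out : Int) : Decidable (Spec_solution topping out) := by unfold Spec_solution; infer_instance

-- ===== CLAIM (what is proved, stated in full; the proofs are below) =====
def Claim_equal_solution : Prop := ∀ (topping : List Int), Dom_solution topping → Spec_solution topping (solution topping)

-- ===== LEMMAS AND PROOFS =====

-- the common value: number of good cuts of s, given the set chul of already-seen elements
def goodCuts (chul : PySem.Set Int) : List Int → Int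
  | [] => 0
  | x :: s =>
    (if PySem.Set.len (PySem.Set.add chul x) = PySem.Set.len (PySem.Set.ofList s) then 1 else 0)
      + goodCuts (PySem.Set.add chul x) s

lemma len_discard (s : List Int) (x : Int) (h : s.Nodup) :
    ((PySem.Set.discard s x).length : Int) = (s.length : Int) - (if x ∈ s then 1 else 0) := by
  induction s with
  | nil => simp [PySem.Set.discard]
  | cons y t ih =>
    simp only [List.nodup_cons] at h
    have iht := ih h.2
    by_cases hxy : y = x
    · have hx' : x ∉ t := hxy ▸ h.1
      have hd : PySem.Set.discard (y :: t) x = PySem.Set.discard t x := by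
        simp [PySem.Set.discard, hxy]
      rw [hd, iht, if_neg hx', if_pos (List.mem_cons.2 (Or.inl hxy.symm))]
      simp only [List.length_cons]
      push_cast; omega
    · have hd : PySem.Set.discard (y :: t) x = y :: PySem.Set.discard t x := by
        simp [PySem.Set.discard, hxy]
      rw [hd]
      by_cases hx : x ∈ t
      · rw [if_pos hx] at iht
        rw [if_pos (List.mem_cons.2 (Or.inr hx))]
        simp only [List.length_cons]; push_cast at iht ⊢; omega
      · rw [if_neg hx] at iht
        rw [if_neg (by simp [Ne.symm hxy, hx] : ¬ (x ∈ y :: t))]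
        simp only [List.length_cons]; push_cast at iht ⊢; omega

lemma len_ofList_cons (x : Int) (s : List Int) :
    PySem.Set.len (PySem.Set.ofList (x :: s)) =
      PySem.Set.len (PySem.Set.ofList s) + (if x ∈ s then 0 else 1) := by
  rw [PySem.Set.ofList_cons]
  have h := len_discard (PySem.Set.ofList s) x (PySem.Set.nodup_ofList s)
  simp only [PySem.Set.len, List.length_cons] at *
  rw [show ((PySem.Set.ofList s).discard x).length + 1 =
      (((PySem.Set.ofList s).discard x).length : Nat) + 1 from rfl]
  push_cast
  rw [h]
  simp [PySem.Set.mem_ofList]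
  by_cases hx : x ∈ s <;> simp [hx]

lemma lemA (s : List Int) : ∀ (a ans : Int) (chul brother : PySem.Set Int),
    ((PySem.List.pyRange a (a + s.length) 1).foldl stepA (ans, s, chul, brother)).1
      = ans + goodCuts chul s := by
  induction s with
  | nil => intro a ans chul brother; simp [PySem.List.pyRange, goodCuts]
  | cons x t ih =>
    intro a ans chul brother
    have hlt : a < a + ((x :: t).length : Int) := by simp only [List.length_cons]; omega
    rw [PySem.List.pyRange_one_cons hlt]
    simp only [List.foldl_cons, stepA, goodCuts]
    have hshift : a + ((x :: t).length : Int) = (a + 1) + (t.length : Int) := by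
      simp only [List.length_cons]; omega
    rw [hshift, ih]
    split_ifs <;> ring

lemma lemB (s : List Int) : ∀ (ans : Int) (seen : PySem.Set Int) (cnt : PySem.Dict Int Int)
    (right : Int),
    (∀ v, cnt.getD v 0 = (s.count v : Int)) →
    right = PySem.Set.len (PySem.Set.ofList s) →
    ((s.foldl stepB (ans, seen, cnt, right)).1 = ans + goodCuts seen s) := by
  induction s with
  | nil => intro ans seen cnt right _ _; simp [goodCuts]
  | cons x t ih =>
    intro ans seen cnt right h1 h2
    simp only [List.foldl_cons, stepB, goodCuts]
    have hcnt : ∀ v, ((cnt.modify x 0 (· - 1)).getD v 0) = (t.count v : Int) := by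
      intro v
      rw [PySem.Dict.getD_modify]
      rcases eq_or_ne v x with hv | hv
      · subst hv
        rw [if_pos rfl, h1 v]
        simp
      · rw [if_neg hv, h1 v]
        simp [Ne.symm hv]
    have hright : (if (cnt.modify x 0 (· - 1)).getD x 0 = 0 then right - 1 else right)
        = PySem.Set.len (PySem.Set.ofList t) := by
      rw [hcnt x, h2, len_ofList_cons]
      by_cases hx : x ∈ t
      · have hc : ¬ ((t.count x : Int) = 0) := by
          simp [Int.natCast_eq_zero, List.count_eq_zero, hx]
        rw [if_neg hc, if_pos hx]; ring
      · have hc : (t.count x : Int) = 0 := by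
          simp [Int.natCast_eq_zero, List.count_eq_zero, hx]
        rw [if_pos hc, if_neg hx]; ring
    rw [hright, ih _ _ _ _ hcnt rfl]
    split_ifs <;> ring

lemma size_counter (xs : List Int) :
    ((PySem.Dict.counter xs).size : Int) = PySem.Set.len (PySem.Set.ofList xs) := by
  have h : (PySem.Dict.counter xs).keys = PySem.Set.ofList xs := PySem.Dict.keys_counter xs
  have : (PySem.Dict.counter xs).size = (PySem.Dict.counter xs).keys.length := by
    simp [PySem.Dict.size, PySem.Dict.keys]
  rw [PySem.Set.len, this, h]

-- ===== VERDICT (by name: the statement is the Claim_ definition above) =====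
theorem solution_spec : Claim_equal_solution := by
  intro topping _
  unfold Spec_solution solution solution_alt
  have hA := lemA topping 0 0 PySem.Set.empty PySem.Set.empty
  have hB := lemB topping 0 PySem.Set.empty (PySem.Dict.counter topping)
      ((PySem.Dict.counter topping).size : Int)
      (by intro v; exact PySem.Dict.getD_counter topping v)
      (size_counter topping)
  simp only [zero_add] at hA hB
  rw [hA, hB]
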